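-- pv_equiv track=rewrite | github.com/cyberklin/adventofcode | 2024/day14/14_2.py | count_max_strike
-- ===== SOURCE A (Python) =====
-- def count_max_strike(n, m, r_dict):
--     max_strike = 0
--     for i in range(n):
--         strike = 0
--         for j in range(m):
--             c = r_dict.get((i,j),0)
--             strike = strike + 1 if c > 0 else 0
--             if strike > max_strike:
--                 max_strike = strike
--     return max_strike
-- ===== SOURCE B (Python) =====
-- def count_max_strike(n, m, r_dict):
--     # sort the occupied in-bounds cells once; a horizontal strike is a run of
--     # lexicographically consecutive cells (same row, adjacent columns)
--     cells = sorted(k for k, c in r_dict.items()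
--                    if c > 0 and 0 <= k[0] < n and 0 <= k[1] < m)
--     best = 0
--     run = 0
--     prev = None
--     for i, j in cells:
--         run = run + 1 if prev == (i, j - 1) else 1
--         if run > best:
--             best = run
--         prev = (i, j)
--     return best
-- ===== Notes on version B (the rewrite author's own statement) =====
-- stated objective: faster
-- what changed: Instead of scanning every cell of the n*m grid, B sorts the occupied in-bounds dict keys once and finds the longest lexicographically consecutive run (same row, adjacent columns) in a single pass over the k occupied cells.
import Mathlib
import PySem

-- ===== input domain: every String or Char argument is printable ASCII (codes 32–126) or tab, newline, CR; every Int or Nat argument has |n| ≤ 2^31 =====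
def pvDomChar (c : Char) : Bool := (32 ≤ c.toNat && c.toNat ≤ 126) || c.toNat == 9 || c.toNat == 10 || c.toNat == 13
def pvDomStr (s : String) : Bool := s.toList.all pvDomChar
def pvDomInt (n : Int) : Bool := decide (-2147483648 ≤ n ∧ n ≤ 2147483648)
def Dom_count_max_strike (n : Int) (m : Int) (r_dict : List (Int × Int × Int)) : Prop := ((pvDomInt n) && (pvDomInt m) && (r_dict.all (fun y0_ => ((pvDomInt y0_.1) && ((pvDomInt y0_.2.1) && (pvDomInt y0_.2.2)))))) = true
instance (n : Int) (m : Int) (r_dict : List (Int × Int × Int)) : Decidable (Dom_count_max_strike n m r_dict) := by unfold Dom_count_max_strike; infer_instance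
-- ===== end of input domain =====

-- B replaces A's scan of all n*m grid cells by one sort of the occupied in-bounds cells and a
-- single pass over them (objective: faster on sparse grids, O(k log k) in k = number of dict entries).

-- ===== PORT A =====
-- r_dict is a Python dict keyed by the pair (i, j); per the type convention it arrives as an
-- association list, viewed through PySem.Dict (insertion order, later duplicate keys overwrite).
def count_max_strike (n : Int) (m : Int) (r_dict : List (Int × Int × Int)) : Int :=
  let d : PySem.Dict (Int × Int) Int :=
    PySem.Dict.ofList (r_dict.map (fun e => ((e.1, e.2.1), e.2.2)))
  (PySem.List.pyRange 0 n).foldl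
    (fun max_strike i =>
      ((PySem.List.pyRange 0 m).foldl
        (fun (st : Int × Int) j =>
          let c := d.getD (i, j) 0
          let strike := if c > 0 then st.2 + 1 else 0
          (if strike > st.1 then strike else st.1, strike))
        (max_strike, 0)).1)
    0

-- ===== PORT B =====
-- 'sorted(cells)' on Python pairs compares lexicographically: ported with key 'toLex'.
def count_max_strike_alt (n : Int) (m : Int) (r_dict : List (Int × Int × Int)) : Int :=
  let d : PySem.Dict (Int × Int) Int :=
    PySem.Dict.ofList (r_dict.map (fun e => ((e.1, e.2.1), e.2.2)))
  let cells : List (Int × Int) :=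
    PySem.List.sorted
      ((d.items.filter (fun kc =>
        decide (0 < kc.2 ∧ 0 ≤ kc.1.1 ∧ kc.1.1 < n ∧ 0 ≤ kc.1.2 ∧ kc.1.2 < m))).map (·.1))
      (fun k => toLex k)
  (cells.foldl
    (fun (st : Int × Int × Option (Int × Int)) k =>
      let run := if st.2.2 = some (k.1, k.2 - 1) then st.2.1 + 1 else 1
      (if run > st.1 then run else st.1, run, some k))
    (0, 0, none)).1

-- ===== PRECONDITION & SPEC =====
def Spec_count_max_strike (n : Int) (m : Int) (r_dict : List (Int × Int × Int)) (out : Int) : Prop := out = count_max_strike_alt n m r_dict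
instance (n : Int) (m : Int) (r_dict : List (Int × Int × Int)) (out : Int) : Decidable (Spec_count_max_strike n m r_dict out) := by unfold Spec_count_max_strike; infer_instance

-- ===== CLAIM (what is proved, stated in full; the proofs are below) =====
def Claim_equal_count_max_strike : Prop := ∀ (n : Int) (m : Int) (r_dict : List (Int × Int × Int)), Dom_count_max_strike n m r_dict → Spec_count_max_strike n m r_dict (count_max_strike n m r_dict)

-- ===== LEMMAS AND PROOFS =====

-- Proof-side names for the shared dict view and the two loop bodies (definitionally the port's lambdas).
def pvD (r_dict : List (Int × Int × Int)) : PySem.Dict (Int × Int) Int :=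
  PySem.Dict.ofList (r_dict.map (fun e => ((e.1, e.2.1), e.2.2)))

def stA (d : PySem.Dict (Int × Int) Int) (i : Int) (st : Int × Int) (j : Int) : Int × Int :=
  let c := d.getD (i, j) 0
  let strike := if c > 0 then st.2 + 1 else 0
  (if strike > st.1 then strike else st.1, strike)

def stB (st : Int × Int × Option (Int × Int)) (k : Int × Int) : Int × Int × Option (Int × Int) :=
  let run := if st.2.2 = some (k.1, k.2 - 1) then st.2.1 + 1 else 1
  (if run > st.1 then run else st.1, run, some k)

def rngI (M : Nat) : List Int := List.map (fun k : Nat => (k : Int)) (List.range M)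

def occb (d : PySem.Dict (Int × Int) Int) (i j : Int) : Bool := decide (0 < d.getD (i, j) 0)

def rowCells (d : PySem.Dict (Int × Int) Int) (i : Int) (M : Nat) : List (Int × Int) :=
  ((rngI M).filter (occb d i)).map (fun j => (i, j))

def gridCells (d : PySem.Dict (Int × Int) Int) (N M : Nat) : List (Int × Int) :=
  (rngI N).flatMap (fun i => rowCells d i M)

def aRowF (d : PySem.Dict (Int × Int) Int) (i : Int) (M : Nat) (st : Int × Int) : Int × Int :=
  (rngI M).foldl (stA d i) st

def aGrid (d : PySem.Dict (Int × Int) Int) (N M : Nat) : Int :=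
  (rngI N).foldl (fun ms i => (aRowF d i M (ms, 0)).1) 0

lemma pyRange_toNat (m : Int) : PySem.List.pyRange 0 m = rngI m.toNat := by
  by_cases h : 0 ≤ m
  · have : m = ((m.toNat : Nat) : Int) := by omega
    rw [this, PySem.List.pyRange_zero_natCast, Int.toNat_natCast]
    unfold rngI; rfl
  · have h1 : PySem.List.pyRange 0 m = [] := by
      apply List.eq_nil_iff_forall_not_mem.mpr
      intro x hx
      have := PySem.List.mem_pyRange_one.mp hx; omega
    have h2 : m.toNat = 0 := by omega
    rw [h1, h2]; unfold rngI; rfl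

lemma A_unfold (n m : Int) (rd : List (Int × Int × Int)) :
    count_max_strike n m rd = aGrid (pvD rd) n.toNat m.toNat := by
  simp only [count_max_strike, pyRange_toNat]
  rfl

lemma mem_rngI (M : Nat) (j : Int) : j ∈ rngI M ↔ 0 ≤ j ∧ j < (M : Int) := by
  simp only [rngI, List.mem_map, List.mem_range]
  constructor
  · rintro ⟨t, ht, rfl⟩
    constructor <;> omega
  · rintro ⟨h0, hM⟩
    refine ⟨j.toNat, by omega, by omega⟩

lemma mem_rngI_toNat (m : Int) (j : Int) : j ∈ rngI m.toNat ↔ 0 ≤ j ∧ j < m := by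
  rw [mem_rngI]; omega

lemma rngI_pairwise (M : Nat) : (rngI M).Pairwise (· < ·) := by
  simp only [rngI, List.pairwise_map]
  exact (List.pairwise_lt_range).imp (by intro a b h; exact_mod_cast h)

lemma mem_rowCells (d : PySem.Dict (Int × Int) Int) (i : Int) (M : Nat) (k : Int × Int) :
    k ∈ rowCells d i M ↔ k.1 = i ∧ k.2 ∈ rngI M ∧ occb d i k.2 := by
  simp only [rowCells, List.mem_map, List.mem_filter]
  constructor
  · rintro ⟨j, ⟨hj, ho⟩, rfl⟩; exact ⟨rfl, hj, ho⟩
  · rintro ⟨h1, h2, h3⟩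
    refine ⟨k.2, ⟨h2, h3⟩, ?_⟩
    rw [← h1]

lemma mem_gridCells (d : PySem.Dict (Int × Int) Int) (N M : Nat) (k : Int × Int) :
    k ∈ gridCells d N M ↔ k.1 ∈ rngI N ∧ k.2 ∈ rngI M ∧ occb d k.1 k.2 := by
  simp only [gridCells, List.mem_flatMap]
  constructor
  · rintro ⟨i, hi, hk⟩
    obtain ⟨h1, h2, h3⟩ := (mem_rowCells d i M k).mp hk
    subst h1; exact ⟨hi, h2, h3⟩
  · rintro ⟨h1, h2, h3⟩
    exact ⟨k.1, h1, (mem_rowCells d k.1 M k).mpr ⟨rfl, h2, h3⟩⟩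

lemma gridCells_pairwise (d : PySem.Dict (Int × Int) Int) (N M : Nat) :
    (gridCells d N M).Pairwise (fun a b => toLex a < toLex b) := by
  unfold gridCells
  rw [List.pairwise_flatMap]
  constructor
  · intro i _
    unfold rowCells
    rw [List.pairwise_map]
    apply List.Pairwise.filter
    exact (rngI_pairwise M).imp (by
      intro a b h
      rw [Prod.Lex.lt_iff]
      right; exact ⟨rfl, h⟩)
  · apply (rngI_pairwise N).imp
    intro i1 i2 h x hx y hy
    obtain ⟨hx1, _, _⟩ := (mem_rowCells d i1 M x).mp hx
    obtain ⟨hy1, _, _⟩ := (mem_rowCells d i2 M y).mp hy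
    rw [Prod.Lex.lt_iff]
    left
    show x.1 < y.1
    rw [hx1, hy1]; exact h

lemma gridCells_nodup (d : PySem.Dict (Int × Int) Int) (N M : Nat) :
    (gridCells d N M).Nodup := by
  apply List.Pairwise.imp (S := Ne) ?_ (gridCells_pairwise d N M)
  intro a b hab heq
  subst heq
  exact lt_irrefl _ hab

-- B's filtered key list: its members are exactly the occupied in-bounds cells.
lemma cells0_mem (n m : Int) (rd : List (Int × Int × Int)) (k : Int × Int) :
    k ∈ ((pvD rd).items.filter (fun kc =>
        decide (0 < kc.2 ∧ 0 ≤ kc.1.1 ∧ kc.1.1 < n ∧ 0 ≤ kc.1.2 ∧ kc.1.2 < m))).map (·.1) ↔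
      (0 < (pvD rd).getD k 0 ∧ 0 ≤ k.1 ∧ k.1 < n ∧ 0 ≤ k.2 ∧ k.2 < m) := by
  have hnd : (pvD rd).keys.Nodup := PySem.Dict.nodup_keys_ofList _
  simp only [List.mem_map, List.mem_filter, decide_eq_true_eq]
  constructor
  · rintro ⟨⟨k', c⟩, ⟨hm, hc, hb⟩, rfl⟩
    have := PySem.Dict.getD_of_mem_items (pvD rd) hm hnd 0
    simp only at this ⊢
    rw [this]
    exact ⟨hc, hb⟩
  · rintro ⟨hpos, hb⟩
    have hg : (pvD rd).get? k = some ((pvD rd).getD k 0) := by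
      rcases hsome : (pvD rd).get? k with _ | v
      · rw [PySem.Dict.getD_eq_get?_getD, hsome] at hpos
        simp at hpos
      · rw [PySem.Dict.getD_eq_get?_getD, hsome]
        rfl
    refine ⟨(k, (pvD rd).getD k 0), ⟨?_, hpos, hb⟩, rfl⟩
    exact PySem.Dict.mem_items_of_get?_eq_some _ hg

lemma cells0_nodup (n m : Int) (rd : List (Int × Int × Int)) :
    (((pvD rd).items.filter (fun kc =>
        decide (0 < kc.2 ∧ 0 ≤ kc.1.1 ∧ kc.1.1 < n ∧ 0 ≤ kc.1.2 ∧ kc.1.2 < m))).map (·.1)).Nodup := by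
  have hnd : (pvD rd).keys.Nodup := PySem.Dict.nodup_keys_ofList _
  exact hnd.sublist (List.Sublist.map _ List.filter_sublist)

lemma sorted_cells_eq (n m : Int) (rd : List (Int × Int × Int)) :
    PySem.List.sorted
      (((pvD rd).items.filter (fun kc =>
        decide (0 < kc.2 ∧ 0 ≤ kc.1.1 ∧ kc.1.1 < n ∧ 0 ≤ kc.1.2 ∧ kc.1.2 < m))).map (·.1))
      (fun k => toLex k)
    = gridCells (pvD rd) n.toNat m.toNat := by
  apply PySem.List.sorted_eq_of_perm_of_pairwise_lt
  · rw [List.perm_ext_iff_of_nodup (gridCells_nodup _ _ _) (cells0_nodup n m rd)]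
    intro k
    rw [mem_gridCells, cells0_mem, mem_rngI_toNat, mem_rngI_toNat]
    unfold occb
    rw [decide_eq_true_eq]
    tauto
  · exact gridCells_pairwise _ _ _

lemma rngI_succ (M : Nat) : rngI (M + 1) = rngI M ++ [(M : Int)] := by
  simp [rngI, List.range_succ]

lemma rowCells_succ (d : PySem.Dict (Int × Int) Int) (i : Int) (M : Nat) :
    rowCells d i (M + 1) =
      rowCells d i M ++ (if occb d i (M : Int) then [(i, (M : Int))] else []) := by
  unfold rowCells
  rw [rngI_succ, List.filter_append, List.map_append]
  congr 1
  by_cases h : occb d i (M : Int) <;> simp [h]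

-- Core invariant: B's single pass over one row's sorted occupied cells computes exactly what A's
-- column scan of that row computes (first components), with the B state's run/prev tracking A's strike.
lemma row_sim (d : PySem.Dict (Int × Int) Int) (i : Int) (M : Nat)
    (best run : Int) (prev : Option (Int × Int))
    (hb : 0 ≤ best) (hprev : ∀ q, prev = some q → q.1 ≠ i) :
      ((rowCells d i M).foldl stB (best, run, prev)).1 = (aRowF d i M (best, 0)).1 ∧
      0 ≤ (aRowF d i M (best, 0)).1 ∧
      (aRowF d i M (best, 0)).2 =
        (if ((rowCells d i M).foldl stB (best, run, prev)).2.2 = some (i, (M : Int) - 1)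
         then ((rowCells d i M).foldl stB (best, run, prev)).2.1 else 0) ∧
      (∀ q, ((rowCells d i M).foldl stB (best, run, prev)).2.2 = some q →
        (q.1 = i ∧ q.2 < (M : Int)) ∨ prev = some q) := by
  induction M with
  | zero =>
    simp only [rowCells, rngI, List.range_zero, List.map_nil, List.filter_nil, List.foldl_nil,
      aRowF, Nat.cast_zero]
    refine ⟨by simp, hb, ?_, fun q hq => Or.inr hq⟩
    rw [if_neg]
    intro hc
    exact hprev _ hc rfl
  | succ M ih =>
    obtain ⟨ih1, ih2, ih3, ih4⟩ := ih
    have hcast : ((M + 1 : Nat) : Int) - 1 = (M : Int) := by push_cast; ring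
    set b := (rowCells d i M).foldl stB (best, run, prev) with hbdef
    set a := aRowF d i M (best, 0) with hadef
    have haS : aRowF d i (M + 1) (best, 0) = stA d i a (M : Int) := by
      rw [aRowF, rngI_succ, List.foldl_append]; rfl
    rw [rowCells_succ, List.foldl_append, haS]
    by_cases hocc : occb d i (M : Int)
    · -- column M is occupied: B processes one more cell (i, M)
      rw [if_pos hocc]
      have hc : d.getD (i, (M : Int)) 0 > 0 := of_decide_eq_true hocc
      have hstA : stA d i a (M : Int) = (if a.2 + 1 > a.1 then a.2 + 1 else a.1, a.2 + 1) := by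
        simp only [stA, if_pos hc]
      have hrun : (if b.2.2 = some (i, (M : Int) - 1) then b.2.1 + 1 else 1) = a.2 + 1 := by
        rw [ih3]
        by_cases hp : b.2.2 = some (i, (M : Int) - 1) <;> simp [hp]
      have hstB : ([((i : Int), (M : Int))]).foldl stB b =
          (if a.2 + 1 > b.1 then a.2 + 1 else b.1, a.2 + 1, some (i, (M : Int))) := by
        simp only [List.foldl_cons, List.foldl_nil, stB, hrun]
      rw [hstA, hstB, ih1]
      refine ⟨rfl, by dsimp only; omega, ?_, ?_⟩
      · dsimp only
        rw [if_pos (by rw [hcast])]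
      · rintro q hq
        dsimp only at hq
        rw [Option.some_inj] at hq
        subst hq
        exact Or.inl ⟨rfl, by push_cast; omega⟩
    · -- column M empty: B state unchanged, A strike resets to 0
      rw [if_neg hocc, List.foldl_nil]
      have hc : ¬ (d.getD (i, (M : Int)) 0 > 0) := fun h => hocc (decide_eq_true h)
      have hstA : stA d i a (M : Int) = (a.1, 0) := by
        simp only [stA, if_neg hc]
        rw [if_neg (by omega)]
      rw [hstA]
      refine ⟨ih1, ih2, ?_, ?_⟩
      · dsimp only
        rw [hcast, if_neg]
        intro hq
        rcases ih4 _ hq with ⟨h1, h2⟩ | h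
        · simp at h2
        · exact absurd rfl (hprev _ h)
      · intro q hq
        rcases ih4 q hq with ⟨h1, h2⟩ | h
        · exact Or.inl ⟨h1, by push_cast; omega⟩
        · exact Or.inr h

lemma gridCells_succ (d : PySem.Dict (Int × Int) Int) (M N : Nat) :
    gridCells d (N + 1) M = gridCells d N M ++ rowCells d (N : Int) M := by
  unfold gridCells
  rw [rngI_succ, List.flatMap_append]
  simp

lemma aGrid_succ (d : PySem.Dict (Int × Int) Int) (M N : Nat) :
    aGrid d (N + 1) M = (aRowF d (N : Int) M (aGrid d N M, 0)).1 := by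
  unfold aGrid
  rw [rngI_succ, List.foldl_append]
  rfl

lemma grid_sim (d : PySem.Dict (Int × Int) Int) (M : Nat) (N : Nat) :
    ((gridCells d N M).foldl stB (0, 0, none)).1 = aGrid d N M ∧
    0 ≤ aGrid d N M ∧
    (∀ q, ((gridCells d N M).foldl stB (0, 0, none)).2.2 = some q → q.1 < (N : Int)) := by
  induction N with
  | zero =>
    refine ⟨rfl, le_refl _, fun q hq => ?_⟩
    simp [gridCells, rngI] at hq
  | succ N ih =>
    obtain ⟨ih1, ih2, ih3⟩ := ih
    set b := (gridCells d N M).foldl stB (0, 0, none) with hbdef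
    have hb3 : b = (b.1, b.2.1, b.2.2) := rfl
    have hprev : ∀ q, b.2.2 = some q → q.1 ≠ (N : Int) := by
      intro q hq heq
      have := ih3 q hq
      omega
    have hrow := row_sim d (N : Int) M b.1 b.2.1 b.2.2 (ih1 ▸ ih2) hprev
    rw [← hb3] at hrow
    rw [gridCells_succ, List.foldl_append, ← hbdef, aGrid_succ, ← ih1]
    refine ⟨hrow.1, ?_, fun q hq => ?_⟩
    · rw [ih1] at hrow ⊢
      exact hrow.2.1
    · rcases hrow.2.2.2 q hq with ⟨h1, _⟩ | h
      · push_cast; omega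
      · have := ih3 q h
        push_cast; omega

lemma B_unfold (n m : Int) (rd : List (Int × Int × Int)) :
    count_max_strike_alt n m rd = ((gridCells (pvD rd) n.toNat m.toNat).foldl stB (0, 0, none)).1 := by
  have h := sorted_cells_eq n m rd
  unfold pvD at h
  simp only [count_max_strike_alt]
  rw [h]
  rfl

-- ===== VERDICT (by name: the statement is the Claim_ definition above) =====
theorem count_max_strike_spec : Claim_equal_count_max_strike := by
  intro n m rd _
  unfold Spec_count_max_strike
  rw [A_unfold, B_unfold, (grid_sim (pvD rd) m.toNat n.toNat).1]
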